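-- pv_equiv track=rewrite | github.com/M3RG-IITD/DiSCoMaT | code/gnn_2/utils.py | get_max_freq_feat
-- ===== SOURCE A (Python) =====
-- from collections import Counter, defaultdict
--
-- def get_max_freq_feat(table):
--     max_freq_feat = []
--     for r in table:
--         cnt = Counter()
--         for cell in r:
--             if cell: cnt[cell] += 1
--         max_freq_feat.append(cnt.most_common(1)[0][1] if cnt else 1)
--     for j in range(len(table[0])):
--         cnt = Counter()
--         for i in range(len(table)):
--             cell = table[i][j]
--             if cell: cnt[cell] += 1
--         max_freq_feat.append(cnt.most_common(1)[0][1] if cnt else 1)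
--     return max_freq_feat
-- ===== SOURCE B (Python) =====
-- def get_max_freq_feat(table):
--     cols = [[row[j] for row in table] for j in range(len(table[0]))]
--     feats = []
--     for seq in table + cols:
--         best = run = 0
--         prev = None
--         for v in sorted(c for c in seq if c):
--             run = run + 1 if v == prev else 1
--             if run > best: best = run
--             prev = v
--         feats.append(best if best else 1)
--     return feats
-- ===== Notes on version B (the rewrite author's own statement) =====
-- stated objective: alternative
-- what changed: A builds a hash Counter per row and per column and reads off its most common count; B uses no dictionary at all: it transposes the table into explicit column lists and, for each row/column sequence, sorts the truthy cells and takes the longest run of equal adjacent values (sort-then-scan instead of hash counting).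
import Mathlib
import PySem

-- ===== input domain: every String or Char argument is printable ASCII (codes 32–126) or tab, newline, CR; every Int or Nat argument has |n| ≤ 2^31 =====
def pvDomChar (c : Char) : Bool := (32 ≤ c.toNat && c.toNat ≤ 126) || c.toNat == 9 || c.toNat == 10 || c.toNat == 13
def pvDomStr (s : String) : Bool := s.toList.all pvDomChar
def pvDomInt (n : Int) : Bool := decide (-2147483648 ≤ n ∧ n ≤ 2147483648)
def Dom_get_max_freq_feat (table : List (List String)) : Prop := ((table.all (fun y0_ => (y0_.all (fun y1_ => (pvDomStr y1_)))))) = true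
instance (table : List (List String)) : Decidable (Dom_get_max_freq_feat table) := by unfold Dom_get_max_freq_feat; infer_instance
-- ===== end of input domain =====

-- B replaces A's per-row/per-column hash Counters by a transposition plus sort-then-scan
-- (longest run of equal adjacent values in the sorted sequence): no dict, a different algorithm.


-- ===== PORT A =====
-- cnt.most_common(1)[0][1] if cnt else 1  (the count of the most common key IS the maximal value)
def pvMaxValOr1 (c : PySem.Dict String Int) : Int :=
  match PySem.List.max? c.values (fun v => v) with
  | some m => m
  | none => 1

def get_max_freq_feat (table : List (List String)) : List Int :=
  let rowPart := table.foldl (fun acc r =>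
      acc ++ [pvMaxValOr1 (r.foldl (fun c cell => if cell ≠ "" then c.modify cell 0 (· + 1) else c) PySem.Dict.empty)]) []
  (PySem.List.pyRange 0 (PySem.List.len (table.headD [])) 1).foldl (fun acc j =>
      acc ++ [pvMaxValOr1 ((PySem.List.pyRange 0 (PySem.List.len table) 1).foldl (fun c i =>
        let cell := PySem.List.pyGetD (PySem.List.pyGetD table i []) j ""
        if cell ≠ "" then c.modify cell 0 (· + 1) else c) PySem.Dict.empty)]) rowPart

-- ===== PORT B =====
-- Source B's inner loop body: run = run + 1 if v == prev else 1; best = max; prev = v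
def pvRunStep (st : Int × Int × Option String) (v : String) : Int × Int × Option String :=
  let run := if some v = st.2.2 then st.2.1 + 1 else 1
  (if run > st.1 then run else st.1, run, some v)

-- Source B's per-sequence reduction: longest equal-run in sorted truthy cells, or 1 if none
def pvMaxFreq (seq : List String) : Int :=
  let st := (PySem.List.sorted (seq.filter (fun c => decide (c ≠ ""))) (fun x => x) false).foldl
    pvRunStep (0, 0, none)
  if st.1 ≠ 0 then st.1 else 1

def get_max_freq_feat_alt (table : List (List String)) : List Int :=
  let cols := (PySem.List.pyRange 0 (PySem.List.len (table.headD [])) 1).map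
    (fun j => table.map (fun row => PySem.List.pyGetD row j ""))
  (table ++ cols).map pvMaxFreq

-- ===== PRECONDITION & SPEC =====
-- Pre_ is exactly where the Python A returns: a non-empty table (table[0] raises IndexError on [])
-- whose every row has at least len(table[0]) cells (shorter rows make table[i][j] raise IndexError).
def Pre_get_max_freq_feat (table : List (List String)) : Prop :=
  table ≠ [] ∧ ∀ r ∈ table, (table.headD []).length ≤ r.length
instance (table : List (List String)) : Decidable (Pre_get_max_freq_feat table) := by
  unfold Pre_get_max_freq_feat; infer_instance
def pvWitness_get_max_freq_feat : List (List String) := [["a", ""], ["a", "a"]]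

def Spec_get_max_freq_feat (table : List (List String)) (out : List Int) : Prop :=
  out = get_max_freq_feat_alt table
instance (table : List (List String)) (out : List Int) : Decidable (Spec_get_max_freq_feat table out) := by
  unfold Spec_get_max_freq_feat; infer_instance

-- ===== CLAIM (what is proved, stated in full; the proofs are below) =====
def Claim_equal_get_max_freq_feat : Prop := ∀ (table : List (List String)), Dom_get_max_freq_feat table → Pre_get_max_freq_feat table → Spec_get_max_freq_feat table (get_max_freq_feat table)

-- ===== LEMMAS AND PROOFS =====

-- proof-side name for A's conditional count update
def pvBumpA (c : PySem.Dict String Int) (cell : String) : PySem.Dict String Int :=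
  if cell ≠ "" then c.modify cell 0 (· + 1) else c

-- "m is the maximal multiplicity of l" (0 for empty l)
def pvIsMaxCnt (l : List String) (m : Int) : Prop :=
  (∀ v ∈ l, (l.count v : Int) ≤ m) ∧ ((m = 0 ∧ l = []) ∨ ∃ v ∈ l, m = (l.count v : Int))

theorem pvIsMaxCnt_unique {l : List String} {m₁ m₂ : Int}
    (h₁ : pvIsMaxCnt l m₁) (h₂ : pvIsMaxCnt l m₂) : m₁ = m₂ := by
  obtain ⟨u₁, a₁⟩ := h₁
  obtain ⟨u₂, a₂⟩ := h₂
  rcases a₁ with ⟨rfl, rfl⟩ | ⟨v, hv, rfl⟩ <;> rcases a₂ with ⟨rfl, h⟩ | ⟨w, hw, rfl⟩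
  · rfl
  · exact absurd hw (List.not_mem_nil)
  · exact absurd (h ▸ hv) (List.not_mem_nil)
  · exact le_antisymm (u₂ v hv) (u₁ w hw)

theorem pvIsMaxCnt_perm {l l' : List String} {m : Int} (hp : l.Perm l')
    (h : pvIsMaxCnt l m) : pvIsMaxCnt l' m := by
  obtain ⟨u, a⟩ := h
  refine ⟨fun v hv => ?_, ?_⟩
  · rw [← hp.count_eq]; exact u v (hp.mem_iff.mpr hv)
  · rcases a with ⟨rfl, rfl⟩ | ⟨v, hv, rfl⟩
    · exact Or.inl ⟨rfl, hp.symm.eq_nil⟩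
    · exact Or.inr ⟨v, hp.mem_iff.mp hv, by rw [hp.count_eq]⟩

-- in a ≤-sorted list every element is ≤ the last one
theorem pv_le_getLast? {s : List String} (h : s.Pairwise (· ≤ ·)) :
    ∀ y ∈ s, ∀ w, s.getLast? = some w → y ≤ w := by
  induction s with
  | nil => intro y hy; simp at hy
  | cons a t ih =>
    intro y hy w hw
    cases t with
    | nil =>
      simp at hy hw
      simp [hy, hw]
    | cons b u =>
      rw [List.getLast?_cons_cons] at hw
      rcases List.mem_cons.mp hy with rfl | hyt
      · have hwmem : w ∈ b :: u := List.mem_of_getLast? hw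
        exact (List.pairwise_cons.mp h).1 w hwmem
      · exact ih (List.pairwise_cons.mp h).2 y hyt w hw

-- invariant of B's run scan over a ≤-sorted list: best is the maximal multiplicity,
-- run is the multiplicity of the last element, prev is the last element
theorem pv_run_inv (s : List String) (h : s.Pairwise (· ≤ ·)) :
    pvIsMaxCnt s (s.foldl pvRunStep (0, 0, none)).1 ∧
    (s.foldl pvRunStep (0, 0, none)).2.2 = s.getLast? ∧
    (∀ w, s.getLast? = some w → (s.foldl pvRunStep (0, 0, none)).2.1 = (s.count w : Int)) := by
  induction s using List.reverseRecOn with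
  | nil =>
    refine ⟨⟨fun v hv => absurd hv (List.not_mem_nil), Or.inl ⟨rfl, rfl⟩⟩, rfl, fun w hw => ?_⟩
    simp at hw
  | append_singleton s x ih =>
    have hps : s.Pairwise (· ≤ ·) := (List.pairwise_append.mp h).1
    have hle : ∀ y ∈ s, y ≤ x := fun y hy =>
      (List.pairwise_append.mp h).2.2 y hy x (List.mem_singleton_self x)
    obtain ⟨⟨ub, att⟩, hprev, hrun⟩ := ih hps
    rw [List.foldl_append, List.foldl_cons, List.foldl_nil]
    set st := s.foldl pvRunStep (0, 0, none) with hst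
    have hlast : (s ++ [x]).getLast? = some x := by simp
    by_cases hx : x ∈ s
    · -- x equals the last element of s
      obtain ⟨w, hw⟩ : ∃ w, s.getLast? = some w :=
        Option.ne_none_iff_exists'.mp (by
          intro hnone
          rw [List.getLast?_eq_none_iff] at hnone
          rw [hnone] at hx; exact absurd hx (List.not_mem_nil))
      have hxw : x = w := le_antisymm (pv_le_getLast? hps x hx w hw)
        (hle w (List.mem_of_getLast? hw))
      have hsome : some x = st.2.2 := by rw [hprev, hw, hxw]
      have hrunval : st.2.1 = (s.count x : Int) := by rw [hxw]; exact hrun w hw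
      have hcnt : ((s ++ [x]).count x : Int) = (s.count x : Int) + 1 := by
        rw [List.count_append]; push_cast; simp
      refine ⟨⟨fun v hv => ?_, ?_⟩, by simp [pvRunStep, hlast], fun w' hw' => ?_⟩
      · -- upper bound
        simp only [pvRunStep, if_pos hsome, hrunval]
        rcases List.mem_append.mp hv with hvs | hvx
        · by_cases hvxeq : v = x
          · subst hvxeq
            rw [hcnt]
            split <;> omega
          · have : (s ++ [x]).count v = s.count v := by
              rw [List.count_append,
                List.count_eq_zero_of_not_mem (by simp [hvxeq] : v ∉ [x])]
              omega
            have hub := ub v hvs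
            rw [this]
            split <;> omega
        · have : v = x := by simpa using hvx
          subst this
          rw [hcnt]
          split <;> omega
      · -- attained
        simp only [pvRunStep, if_pos hsome, hrunval]
        split
        · exact Or.inr ⟨x, by simp, by rw [hcnt]⟩
        · rcases att with ⟨hst0, rfl⟩ | ⟨v, hv, hveq⟩
          · exact absurd hx (List.not_mem_nil)
          · have hvx : v ≠ x := by
              intro hvx; subst hvx
              omega
            refine Or.inr ⟨v, List.mem_append.mpr (Or.inl hv), ?_⟩
            rw [List.count_append,
              List.count_eq_zero_of_not_mem (by simp [hvx] : v ∉ [x])]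
            exact hveq
      · -- run = count of new last
        rw [hlast] at hw'
        injection hw' with hw'
        subst hw'
        simp only [pvRunStep, if_pos hsome, hrunval, hcnt]
    · -- x is new: run restarts at 1
      have hnsome : ¬ some x = st.2.2 := by
        rw [hprev]
        intro hcon
        exact hx (List.mem_of_getLast? hcon.symm)
      have hcx : ((s ++ [x]).count x : Int) = 1 := by
        rw [List.count_append]
        simp [List.count_eq_zero_of_not_mem hx]
      refine ⟨⟨fun v hv => ?_, ?_⟩, by simp [pvRunStep, hlast], fun w' hw' => ?_⟩
      · simp only [pvRunStep, if_neg hnsome]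
        rcases List.mem_append.mp hv with hvs | hvx
        · have hvxne : v ≠ x := fun hc => hx (hc ▸ hvs)
          have : (s ++ [x]).count v = s.count v := by
            rw [List.count_append,
              List.count_eq_zero_of_not_mem (by simp [hvxne] : v ∉ [x])]
            omega
          have hub := ub v hvs
          rw [this]
          split <;> omega
        · have : v = x := by simpa using hvx
          subst this
          rw [hcx]
          split <;> omega
      · simp only [pvRunStep, if_neg hnsome]
        split
        · exact Or.inr ⟨x, by simp, by rw [hcx]⟩
        · rcases att with ⟨hst0, rfl⟩ | ⟨v, hv, hveq⟩
          · omega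
          · have hvxne : v ≠ x := fun hc => hx (hc ▸ hv)
            refine Or.inr ⟨v, List.mem_append.mpr (Or.inl hv), ?_⟩
            rw [List.count_append,
              List.count_eq_zero_of_not_mem (by simp [hvxne] : v ∉ [x])]
            exact hveq
      · rw [hlast] at hw'
        injection hw' with hw'
        subst hw'
        simp only [pvRunStep, if_neg hnsome, hcx]

-- the A side: pvMaxValOr1 of Counter(l) is the maximal multiplicity of l (or 1 if l is empty)
theorem pv_A_side (l : List String) :
    (l = [] ∧ pvMaxValOr1 (PySem.Dict.counter l) = 1) ∨
    (l ≠ [] ∧ pvIsMaxCnt l (pvMaxValOr1 (PySem.Dict.counter l))) := by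
  have hvals : (PySem.Dict.counter l).values
      = (PySem.Set.ofList l).map (fun k => (l.count k : Int)) := by
    show ((PySem.Dict.counter l).items).map (·.2) = _
    rw [PySem.Dict.items_counter, List.map_map]
    simp [Function.comp_def]
  by_cases hl : l = []
  · subst hl
    left
    refine ⟨rfl, ?_⟩
    unfold pvMaxValOr1
    rw [hvals]
    rfl
  · right
    refine ⟨hl, ?_⟩
    unfold pvMaxValOr1
    rw [hvals]
    have hmem : ∀ x, x ∈ (PySem.Set.ofList l).map (fun k => (l.count k : Int)) ↔
        ∃ v ∈ l, x = (l.count v : Int) := by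
      intro x
      simp only [List.mem_map, PySem.Set.mem_ofList]
      constructor
      · rintro ⟨k, hk, rfl⟩; exact ⟨k, hk, rfl⟩
      · rintro ⟨k, hk, rfl⟩; exact ⟨k, hk, rfl⟩
    cases hmax : PySem.List.max? ((PySem.Set.ofList l).map (fun k => (l.count k : Int))) (fun v => v) with
    | none =>
      rw [PySem.List.max?_eq_none_iff] at hmax
      obtain ⟨a, ha⟩ : ∃ a, a ∈ l := by
        cases l with
        | nil => exact absurd rfl hl
        | cons a t => exact ⟨a, List.mem_cons_self⟩
      have : ((l.count a : Int)) ∈ ([] : List Int) := by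
        rw [← hmax, hmem]
        exact ⟨a, ha, rfl⟩
      exact absurd this (List.not_mem_nil)
    | some m =>
      refine ⟨fun v hv => ?_, Or.inr ?_⟩
      · exact PySem.List.max?_isMax hmax _ ((hmem _).mpr ⟨v, hv, rfl⟩)
      · obtain ⟨v, hv, hveq⟩ := (hmem m).mp (PySem.List.max?_mem hmax)
        exact ⟨v, hv, hveq⟩

-- A's Counter fold over a sequence, reduced by pvMaxValOr1, equals B's sorted-run scan
theorem pv_main (seq : List String) :
    pvMaxValOr1 (seq.foldl pvBumpA PySem.Dict.empty) = pvMaxFreq seq := by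
  have hfold : seq.foldl pvBumpA PySem.Dict.empty
      = PySem.Dict.counter (seq.filter (fun c => decide (c ≠ ""))) := by
    unfold pvBumpA
    rw [PySem.List.foldl_ite_eq_foldl_filter, PySem.Dict.counter_eq_foldl]
  set l := seq.filter (fun c => decide (c ≠ "")) with hl
  set s := PySem.List.sorted l (fun x => x) false with hs
  have hperm : s.Perm l := by rw [hs]; exact PySem.List.sorted_perm l (fun x => x) false
  have hsorted : s.Pairwise (· ≤ ·) := by
    rw [hs]
    exact PySem.List.sorted_pairwise l (fun x => x)
  obtain ⟨hbest, -, -⟩ := pv_run_inv s hsorted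
  rw [hfold]
  unfold pvMaxFreq
  rw [← hl, ← hs]
  rcases pv_A_side l with ⟨hnil, hval⟩ | ⟨hne, hmc⟩
  · -- empty: Counter empty gives 1; sorted list empty, best = 0, B gives 1
    have hsnil : s = [] := by rw [hs, hnil]; rfl
    rw [hval, hsnil]
    rfl
  · -- nonempty: both are THE maximal multiplicity
    have hmc' : pvIsMaxCnt s (pvMaxValOr1 (PySem.Dict.counter l)) :=
      pvIsMaxCnt_perm hperm.symm hmc
    have heq := pvIsMaxCnt_unique hmc' hbest
    have hsne : s ≠ [] := by
      intro h0
      rw [h0] at hperm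
      exact hne hperm.symm.eq_nil
    have hpos : (s.foldl pvRunStep (0, 0, none)).1 ≠ 0 := by
      obtain ⟨-, h⟩ := hbest
      rcases h with ⟨-, hsnil⟩ | ⟨v, hv, hveq⟩
      · exact absurd hsnil hsne
      · have : 0 < s.count v := List.count_pos_iff.mpr hv
        omega
    rw [if_pos hpos, heq]

-- port A unrolled to two maps
theorem pv_portA_char (table : List (List String)) : get_max_freq_feat table =
    table.map (fun r => pvMaxValOr1 (r.foldl pvBumpA PySem.Dict.empty))
    ++ (PySem.List.pyRange 0 (PySem.List.len (table.headD [])) 1).map (fun j =>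
         pvMaxValOr1 ((PySem.List.pyRange 0 (PySem.List.len table) 1).foldl
           (fun c i => pvBumpA c (PySem.List.pyGetD (PySem.List.pyGetD table i []) j "")) PySem.Dict.empty)) := by
  unfold get_max_freq_feat
  simp only [PySem.List.foldl_append_singleton_eq_map]
  rfl

-- ===== VERDICT (by name: the statement is the Claim_ definition above) =====
theorem get_max_freq_feat_spec : Claim_equal_get_max_freq_feat := by
  intro table _ _
  unfold Spec_get_max_freq_feat get_max_freq_feat_alt
  rw [pv_portA_char, List.map_append, List.map_map]
  refine congrArg₂ (· ++ ·) ?_ ?_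
  · exact List.map_congr_left (fun r _ => pv_main r)
  · refine List.map_congr_left (fun j _ => ?_)
    show pvMaxValOr1 _ = pvMaxFreq (table.map (fun row => PySem.List.pyGetD row j ""))
    rw [PySem.List.foldl_pyRange_zero_pyGetD table []
          (fun c row => pvBumpA c (PySem.List.pyGetD row j "")) PySem.Dict.empty,
        ← List.foldl_map]
    exact pv_main _
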